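-- pv_equiv track=rewrite | github.com/nikhillahoti/HackerRank-Solutions | PickingNumbers.py | pickingNumbers
-- ===== SOURCE A (Python) =====
-- def pickingNumbers(a):
--     dicNumCount = {}
--     for x in a:
--         if x in dicNumCount:
--             dicNumCount[x] += 1
--         else:
--             dicNumCount[x] = 1
--
--     maxCount = -1
--     for x in dicNumCount:
--         countwithPrev = dicNumCount[x] + (dicNumCount[x-1] if (x-1) in dicNumCount else 0)
--         countwithNext = dicNumCount[x] + (dicNumCount[x+1] if (x+1) in dicNumCount else 0)
--         if countwithNext > maxCount and countwithNext > countwithPrev: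
--             maxCount = countwithNext
--         else:
--             if countwithPrev > maxCount:
--                 maxCount = countwithPrev
--
--     return maxCount
-- ===== SOURCE B (Python) =====
-- def pickingNumbers(a):
--     s = sorted(a)
--     best = -1
--     prev_val = None
--     prev_cnt = 0
--     k = 0
--     n = len(s)
--     while k < n:
--         v = s[k]
--         c = 0
--         while k < n and s[k] == v:
--             c += 1
--             k += 1
--         cand = c + (prev_cnt if prev_val == v - 1 else 0)
--         if cand > best:
--             best = cand
--         prev_val = v
--         prev_cnt = c
--     return best
-- ===== Notes on version B (the rewrite author's own statement) =====
-- stated objective: alternative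
-- what changed: Replaced the hash-counter with per-key neighbour lookups by sort-then-scan: sort the list, walk it once compressing equal runs, keeping a running max of each run length plus the previous run's length when the values differ by exactly 1.
import Mathlib
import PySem

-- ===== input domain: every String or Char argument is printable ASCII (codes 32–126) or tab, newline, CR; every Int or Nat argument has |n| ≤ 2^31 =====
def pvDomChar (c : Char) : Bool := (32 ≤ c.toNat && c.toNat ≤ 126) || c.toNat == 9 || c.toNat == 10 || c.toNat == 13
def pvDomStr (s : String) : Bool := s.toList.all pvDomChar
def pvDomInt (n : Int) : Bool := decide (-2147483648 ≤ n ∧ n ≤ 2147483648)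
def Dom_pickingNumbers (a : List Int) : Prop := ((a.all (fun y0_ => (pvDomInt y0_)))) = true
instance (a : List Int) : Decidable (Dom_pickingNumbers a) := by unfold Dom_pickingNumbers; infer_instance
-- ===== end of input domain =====

-- B replaces A's hash-counter with neighbour lookups by a sort-then-scan over runs of equal values (alternative algorithm, similar cost).

-- ===== PORT A =====
def pickingNumbers (a : List Int) : Int :=
  let d := a.foldl (fun d x =>
    if d.contains x then d.insert x (d.getD x 0 + 1) else d.insert x 1) PySem.Dict.empty
  d.keys.foldl (fun maxCount x =>
    let countwithPrev := d.getD x 0 + (if d.contains (x - 1) then d.getD (x - 1) 0 else 0)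
    let countwithNext := d.getD x 0 + (if d.contains (x + 1) then d.getD (x + 1) 0 else 0)
    if countwithNext > maxCount ∧ countwithNext > countwithPrev then countwithNext
    else if countwithPrev > maxCount then countwithPrev else maxCount) (-1)

-- ===== PORT B =====
-- inner while loop of Source B: count the leading copies of v, return (count, rest)
def runSplit (v : Int) : List Int → Nat × List Int
  | [] => (0, [])
  | x :: t => if x = v then ((runSplit v t).1 + 1, (runSplit v t).2) else (0, x :: t)

lemma runSplit_length (v : Int) : ∀ t : List Int, (runSplit v t).2.length ≤ t.length := by
  intro t
  induction t with
  | nil => simp [runSplit]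
  | cons x t ih =>
    by_cases h : x = v
    · simp [runSplit, h]; omega
    · simp [runSplit, h]

-- outer while loop of Source B: state = (best, prev_val, prev_cnt)
def loopB (best : Int) (pv : Option Int) (pc : Int) : List Int → Int
  | [] => best
  | v :: t =>
      let c : Int := ((runSplit v t).1 : Int) + 1
      let cand := c + (if pv = some (v - 1) then pc else 0)
      loopB (if cand > best then cand else best) (some v) c (runSplit v t).2
termination_by s => s.length
decreasing_by
  simpa using Nat.lt_succ_of_le (runSplit_length v t)

def pickingNumbers_alt (a : List Int) : Int :=
  loopB (-1) none 0 (PySem.List.sorted a (fun x => x) false)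

-- ===== PRECONDITION & SPEC =====
def Spec_pickingNumbers (a : List Int) (out : Int) : Prop := out = pickingNumbers_alt a
instance (a : List Int) (out : Int) : Decidable (Spec_pickingNumbers a out) := by unfold Spec_pickingNumbers; infer_instance

-- ===== CLAIM (what is proved, stated in full; the proofs are below) =====
def Claim_equal_pickingNumbers : Prop := ∀ (a : List Int), Dom_pickingNumbers a → Spec_pickingNumbers a (pickingNumbers a)

-- ===== LEMMAS AND PROOFS =====

-- the common yardstick: count of x plus count of x - 1 in a
def cwP (a : List Int) (x : Int) : Int := (a.count x : Int) + (a.count (x - 1) : Int)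

lemma foldl_maxf_le_iff (f : Int → Int) :
    ∀ (L : List Int) (i z : Int),
      L.foldl (fun acc x => max acc (f x)) i ≤ z ↔ i ≤ z ∧ ∀ x ∈ L, f x ≤ z := by
  intro L
  induction L with
  | nil => simp
  | cons x t ih =>
    intro i z
    simp only [List.foldl_cons, ih, List.mem_cons]
    constructor
    · rintro ⟨h1, h2⟩
      refine ⟨le_of_max_le_left h1, ?_⟩
      rintro y (rfl | hy)
      · exact le_of_max_le_right h1
      · exact h2 y hy
    · rintro ⟨h1, h2⟩
      exact ⟨max_le h1 (h2 x (Or.inl rfl)), fun y hy => h2 y (Or.inr hy)⟩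

lemma dictA (a : List Int) :
    a.foldl (fun d x => if d.contains x then d.insert x (d.getD x 0 + 1) else d.insert x 1)
      PySem.Dict.empty = PySem.Dict.counter a := by
  rw [← PySem.Dict.foldl_insert_getD_add_one_eq_counter]
  apply List.foldl_ext
  intro d x _
  by_cases h : d.contains x = true
  · simp [h]
  · rw [PySem.Dict.getD_of_not_contains d 0 (by simpa using h)]
    simp [h]

lemma counterD (a : List Int) (y : Int) :
    (if (PySem.Dict.counter a).contains y then (PySem.Dict.counter a).getD y 0 else 0)
      = (a.count y : Int) := by
  by_cases hy : y ∈ a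
  · simp [PySem.Dict.contains_counter, PySem.Dict.getD_counter, hy]
  · simp [PySem.Dict.contains_counter, hy, List.count_eq_zero_of_not_mem hy]

lemma branchA (mc p q : Int) :
    (if q > mc ∧ q > p then q else if p > mc then p else mc) = max mc (max p q) := by
  simp only [max_def]
  split_ifs <;> omega

lemma A_le_iff (a : List Int) (z : Int) :
    pickingNumbers a ≤ z ↔ (-1 ≤ z ∧ ∀ x ∈ a, cwP a x ≤ z) := by
  unfold pickingNumbers
  simp only [dictA]
  rw [List.foldl_ext _ (fun mc x =>
      max mc (max ((a.count x : Int) + (a.count (x - 1) : Int))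
                  ((a.count x : Int) + (a.count (x + 1) : Int)))) (-1)
      (by
        intro mc x _
        simp only [counterD]
        simp only [PySem.Dict.getD_counter]
        exact branchA _ _ _)]
  rw [foldl_maxf_le_iff]
  simp only [PySem.Dict.keys_counter, PySem.Set.mem_ofList]
  constructor
  · rintro ⟨h1, h2⟩
    refine ⟨h1, fun x hx => le_trans (le_max_left _ _) (h2 x hx)⟩
  · rintro ⟨h1, h2⟩
    refine ⟨h1, fun x hx => max_le (h2 x hx) ?_⟩
    by_cases h3 : (x + 1) ∈ a
    · have := h2 (x + 1) h3
      unfold cwP at this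
      rw [show x + 1 - 1 = x by ring] at this
      omega
    · have h4 : a.count (x + 1) = 0 := List.count_eq_zero_of_not_mem h3
      have := h2 x hx
      unfold cwP at this
      have h5 : (0:Int) ≤ (a.count (x - 1) : Int) := Int.natCast_nonneg _
      omega

lemma runSplit_append (v : Int) : ∀ t : List Int,
    t = List.replicate (runSplit v t).1 v ++ (runSplit v t).2 := by
  intro t
  induction t with
  | nil => simp [runSplit]
  | cons x t ih =>
    by_cases h : x = v
    · simp only [runSplit, h, reduceIte]
      exact congrArg (v :: ·) ih
    · simp [runSplit, h]

lemma runSplit_rest_gt (v : Int) : ∀ t : List Int, t.Pairwise (· ≤ ·) →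
    (∀ x ∈ t, v ≤ x) → ∀ x ∈ (runSplit v t).2, v < x := by
  intro t
  induction t with
  | nil => simp [runSplit]
  | cons x t ih =>
    intro hp hle
    rcases List.pairwise_cons.mp hp with ⟨hxall, htp⟩
    by_cases h : x = v
    · subst h
      simp only [runSplit, reduceIte]
      exact ih htp hxall
    · have hvx : v < x := lt_of_le_of_ne (hle x (List.mem_cons_self)) (Ne.symm h)
      simp only [runSplit, if_neg h]
      intro y hy
      rcases List.mem_cons.mp hy with rfl | hyt
      · exact hvx
      · exact lt_of_lt_of_le hvx (hxall y hyt)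

lemma loopB_le_iff : ∀ (n : Nat) (s : List Int), s.length ≤ n → s.Pairwise (· ≤ ·) →
    ∀ (best : Int) (pv : Option Int) (pc z : Int),
    (∀ p, pv = some p → ∀ x ∈ s, p < x) →
    (loopB best pv pc s ≤ z ↔ best ≤ z ∧ ∀ v ∈ s,
       (s.count v : Int) +
         (if (v - 1) ∈ s then (s.count (v - 1) : Int)
          else if pv = some (v - 1) then pc else 0) ≤ z) := by
  intro n
  induction n with
  | zero =>
    intro s hl
    have hs : s = [] := List.eq_nil_of_length_eq_zero (Nat.le_zero.mp hl)
    subst hs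
    intro _ best pv pc z _
    simp [loopB]
  | succ n ih =>
    intro s hl hp best pv pc z hctx
    cases s with
    | nil => simp [loopB]
    | cons v t =>
      rcases List.pairwise_cons.mp hp with ⟨hvt, htp⟩
      have hApp := runSplit_append v t
      have hgt : ∀ x ∈ (runSplit v t).2, v < x := runSplit_rest_gt v t htp hvt
      have hvr : v ∉ (runSplit v t).2 := fun h => lt_irrefl v (hgt v h)
      have hsub : (runSplit v t).2.Sublist t := by
        conv_rhs => rw [hApp]
        exact List.sublist_append_right _ _
      have hrp : (runSplit v t).2.Pairwise (· ≤ ·) := htp.sublist hsub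
      have hrl : (runSplit v t).2.length ≤ n := by
        have h1 := runSplit_length v t
        simp only [List.length_cons] at hl
        omega
      set c0 := (runSplit v t).1 with hc0
      set r := (runSplit v t).2 with hr
      -- counts
      have hcv : (v :: t).count v = c0 + 1 := by
        rw [List.count_cons_self]
        conv_lhs => rw [hApp]
        rw [List.count_append, List.count_replicate, List.count_eq_zero_of_not_mem hvr]
        simp
      have hcu : ∀ u, v < u → (v :: t).count u = r.count u := by
        intro u hu
        rw [List.count_cons_of_ne (by omega)]
        conv_lhs => rw [hApp]
        rw [List.count_append, List.count_replicate]
        have h7 : ¬v = u := by omega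
        simp [h7]
      have hmem : ∀ u, u ∈ v :: t ↔ u = v ∨ u ∈ r := by
        intro u
        rw [List.mem_cons]
        constructor
        · rintro (rfl | hut)
          · exact Or.inl rfl
          · rw [hApp, List.mem_append] at hut
            rcases hut with h | h
            · exact Or.inl (List.eq_of_mem_replicate h)
            · exact Or.inr h
        · rintro (rfl | hur)
          · exact Or.inl rfl
          · refine Or.inr ?_
            rw [hApp, List.mem_append]
            exact Or.inr hur
      have hvm1 : (v - 1) ∉ v :: t := by
        intro h
        rcases List.mem_cons.mp h with h1 | h1
        · omega
        · exact absurd (hvt _ h1) (by omega)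
      -- one unfolding of the loop
      rw [show loopB best pv pc (v :: t)
            = loopB (if ((c0 : Int) + 1 + (if pv = some (v - 1) then pc else 0)) > best
                     then ((c0 : Int) + 1 + (if pv = some (v - 1) then pc else 0)) else best)
                (some v) ((c0 : Int) + 1) r from by rw [loopB]]
      rw [ih r hrl hrp _ _ _ z (by rintro p ⟨rfl⟩; exact hgt)]
      set cand := (c0 : Int) + 1 + (if pv = some (v - 1) then pc else 0) with hcand
      have hmaxle : (if cand > best then cand else best) ≤ z ↔ best ≤ z ∧ cand ≤ z := by
        split_ifs <;> omega
      -- the head candidate in s-form equals cand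
      have hheads : ((v :: t).count v : Int) +
          (if (v - 1) ∈ v :: t then ((v :: t).count (v - 1) : Int)
           else if pv = some (v - 1) then pc else 0) = cand := by
        rw [hcv, if_neg hvm1, hcand]
        push_cast
        ring
      -- candidates of elements of r agree in s-form and r-form
      have hbody : ∀ u ∈ r,
          ((v :: t).count u : Int) +
            (if (u - 1) ∈ v :: t then ((v :: t).count (u - 1) : Int)
             else if pv = some (u - 1) then pc else 0)
          = (r.count u : Int) +
            (if (u - 1) ∈ r then (r.count (u - 1) : Int)
             else if some v = some (u - 1) then (c0 : Int) + 1 else 0) := by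
        intro u hur
        have hvu : v < u := hgt u hur
        rw [hcu u hvu]
        by_cases h1 : (u - 1) ∈ r
        · have hvu1 : v < u - 1 := hgt _ h1
          rw [if_pos ((hmem (u - 1)).mpr (Or.inr h1)), if_pos h1, hcu _ hvu1]
        · by_cases h2 : u - 1 = v
          · rw [if_pos ((hmem (u - 1)).mpr (Or.inl h2)), if_neg h1, h2, hcv,
              if_pos rfl]
            push_cast
            ring
          · have h3 : (u - 1) ∉ v :: t := fun h => by
              rcases (hmem (u - 1)).mp h with h4 | h4
              · exact h2 h4
              · exact h1 h4
            have h5 : ¬pv = some (u - 1) := by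
              rintro rfl
              have := hctx (u - 1) rfl v (List.mem_cons_self)
              omega
            have h6 : ¬(some v : Option Int) = some (u - 1) := by
              intro h
              injection h with h'
              omega
            rw [if_neg h3, if_neg h1, if_neg h5, if_neg h6]
      constructor
      · rintro ⟨h1, h2⟩
        rcases hmaxle.mp h1 with ⟨hb, hc⟩
        refine ⟨hb, ?_⟩
        intro u hu
        rcases (hmem u).mp hu with rfl | hur
        · rw [hheads]; exact hc
        · rw [hbody u hur]; exact h2 u hur
      · rintro ⟨h1, h2⟩
        refine ⟨hmaxle.mpr ⟨h1, ?_⟩, ?_⟩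
        · rw [← hheads]; exact h2 v (List.mem_cons_self)
        · intro u hur
          rw [← hbody u hur]
          exact h2 u ((hmem u).mpr (Or.inr hur))

lemma B_le_iff (a : List Int) (z : Int) :
    pickingNumbers_alt a ≤ z ↔ (-1 ≤ z ∧ ∀ x ∈ a, cwP a x ≤ z) := by
  unfold pickingNumbers_alt
  set s := PySem.List.sorted a (fun x => x) false with hs
  have hperm : s.Perm a := PySem.List.sorted_perm a _ false
  have hp : s.Pairwise (· ≤ ·) := by
    simpa using PySem.List.sorted_pairwise a (fun x => x)
  rw [loopB_le_iff s.length s le_rfl hp (-1) none 0 z (by rintro p ⟨⟩)]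
  have hinner : ∀ v,
      (s.count v : Int) +
        (if (v - 1) ∈ s then (s.count (v - 1) : Int)
         else if (none : Option Int) = some (v - 1) then 0 else 0) = cwP a v := by
    intro v
    unfold cwP
    by_cases h : (v - 1) ∈ s
    · rw [if_pos h, hperm.count_eq, hperm.count_eq]
    · rw [if_neg h, if_neg (by simp)]
      have h0 : a.count (v - 1) = 0 :=
        List.count_eq_zero_of_not_mem (fun hm => h (hperm.mem_iff.mpr hm))
      rw [hperm.count_eq, h0]
      simp
  constructor <;> rintro ⟨h1, h2⟩ <;> refine ⟨h1, ?_⟩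
  · intro x hx
    rw [← hinner x]
    exact h2 x (hperm.mem_iff.mpr hx)
  · intro x hx
    rw [hinner x]
    exact h2 x (hperm.mem_iff.mp hx)

-- ===== VERDICT (by name: the statement is the Claim_ definition above) =====
theorem pickingNumbers_spec : Claim_equal_pickingNumbers := by
  intro a _
  unfold Spec_pickingNumbers
  have hA := A_le_iff a
  have hB := B_le_iff a
  apply le_antisymm
  · exact (hA _).mpr ((hB _).mp le_rfl)
  · exact (hB _).mpr ((hA _).mp le_rfl)
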